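-- pv_equiv track=rewrite | github.com/MrBrantCode/unitest_baseline | mut_generate/mist_train_cf/cf_35096/solution.py | count_grant_types
-- ===== SOURCE A (Python) =====
-- def count_grant_types(input_string: str) -> dict:
--     grant_types = input_string.split(", ")
--     grant_type_count = {}
--
--     for grant_type in grant_types:
--         if grant_type in grant_type_count:
--             grant_type_count[grant_type] += 1
--         else:
--             grant_type_count[grant_type] = 1
--
--     return grant_type_count
-- ===== SOURCE B (Python) =====
-- def count_grant_types(input_string: str) -> dict:
--     def tally(tokens):
--         if not tokens:
--             return {}
--         head, tail = tokens[0], tokens[1:]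
--         rest = [t for t in tail if t != head]
--         result = {head: 1 + len(tail) - len(rest)}
--         result.update(tally(rest))
--         return result
--     return tally(input_string.split(", "))
-- ===== Notes on version B (the rewrite author's own statement) =====
-- stated objective: alternative
-- what changed: Replaced the dict-accumulation loop by a recursive group-and-remove pass: take the first token, derive its count from how many copies a filter removes, recurse on the remaining tokens with that token deleted.
import Mathlib
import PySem

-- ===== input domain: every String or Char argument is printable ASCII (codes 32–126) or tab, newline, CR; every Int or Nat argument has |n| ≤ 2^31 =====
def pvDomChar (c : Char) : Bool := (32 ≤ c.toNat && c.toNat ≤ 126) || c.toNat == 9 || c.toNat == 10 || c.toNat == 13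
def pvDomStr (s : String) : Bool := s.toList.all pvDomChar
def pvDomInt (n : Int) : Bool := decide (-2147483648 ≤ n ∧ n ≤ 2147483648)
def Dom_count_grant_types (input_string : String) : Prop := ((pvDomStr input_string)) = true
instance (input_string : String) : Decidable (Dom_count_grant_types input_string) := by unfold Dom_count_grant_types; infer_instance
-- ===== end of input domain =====

-- ===== PORT A =====
-- B replaces A's dict-accumulation loop by recursive group-and-remove over the token list; same result, not faster.
def count_grant_types (input_string : String) : List (String × Int) :=
  let grant_types := (PySem.Str.split? input_string ", ").getD []
  (grant_types.foldl (fun d g =>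
      if d.contains g then d.insert g (d.getD g 0 + 1) else d.insert g 1)
    PySem.Dict.empty).items

-- ===== PORT B =====
def pvTally : List String → List (String × Int)
  | [] => []
  | h :: t =>
    let rest := t.filter (fun x => x != h)
    (h, (1 : Int) + (t.length : Int) - (rest.length : Int)) :: pvTally rest
termination_by l => l.length
decreasing_by
  simp only [List.length_cons, List.length_unattach]
  exact Nat.lt_succ_of_le (le_trans (List.length_filter_le _ _) (by simp))

def count_grant_types_alt (input_string : String) : List (String × Int) :=
  pvTally ((PySem.Str.split? input_string ", ").getD [])

-- ===== PRECONDITION & SPEC =====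
def Spec_count_grant_types (input_string : String) (out : List (String × Int)) : Prop := out = count_grant_types_alt input_string
instance (input_string : String) (out : List (String × Int)) : Decidable (Spec_count_grant_types input_string out) := by unfold Spec_count_grant_types; infer_instance

-- ===== CLAIM =====
def Claim_equal_count_grant_types : Prop := ∀ (input_string : String), Dom_count_grant_types input_string → Spec_count_grant_types input_string (count_grant_types input_string)

-- ===== LEMMAS AND PROOFS =====

-- skipping elements already present in the accumulator set does not change the fold
lemma pv_foldl_add_skip (h : String) (l : List String) :
    ∀ s : PySem.Set String, h ∈ s →
      l.foldl PySem.Set.add s = (l.filter (fun x => x != h)).foldl PySem.Set.add s := by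
  induction l with
  | nil => intro s _; rfl
  | cons x l ih =>
    intro s hs
    by_cases hx : x = h
    · subst hx
      have : PySem.Set.add s x = s := by
        simp [PySem.Set.add, PySem.Set.contains, hs]
      simp [List.filter, this, ih s hs]
    · have hx' : (x != h) = true := by simp [hx]
      have hmem : h ∈ PySem.Set.add s x := by
        simp [PySem.Set.add]; split <;> simp [hs]
      simp [List.filter, hx', List.foldl_cons, ih _ hmem]

-- a head element absent from the rest of the fold stays at the front
lemma pv_foldl_add_cons (h : String) (l : List String) (hl : h ∉ l) :
    ∀ s : PySem.Set String, l.foldl PySem.Set.add (h :: s) = h :: l.foldl PySem.Set.add s := by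
  induction l with
  | nil => intro s; rfl
  | cons x l ih =>
    intro s
    have hx : x ≠ h := fun e => hl (e ▸ List.mem_cons_self ..)
    have hl' : h ∉ l := fun m => hl (List.mem_cons_of_mem _ m)
    by_cases hm : x ∈ s
    · simp [List.foldl_cons, PySem.Set.add, PySem.Set.contains, hx, hm, ih hl']
    · simp [List.foldl_cons, PySem.Set.add, PySem.Set.contains, hx, hm, ih hl']

lemma pv_ofList_cons (h : String) (t : List String) :
    PySem.Set.ofList (h :: t) = h :: PySem.Set.ofList (t.filter (fun x => x != h)) := by
  have e0 : PySem.Set.ofList (h :: t) = t.foldl PySem.Set.add [h] := by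
    rw [PySem.Set.ofList_eq_foldl]
    simp [List.foldl_cons, PySem.Set.add, PySem.Set.contains]
  have e1 : t.foldl PySem.Set.add [h]
      = (t.filter (fun x => x != h)).foldl PySem.Set.add [h] :=
    pv_foldl_add_skip h t [h] (by simp)
  have hnot : h ∉ t.filter (fun x => x != h) := by
    intro m
    have := (List.mem_filter.mp m).2
    simp at this
  rw [e0, e1, pv_foldl_add_cons h _ hnot, PySem.Set.ofList_eq_foldl]

lemma pv_tally_eq : ∀ (L : List String),
    (PySem.Set.ofList L).map (fun k => (k, (L.count k : Int))) = pvTally L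
  | [] => by simp [pvTally, PySem.Set.ofList]
  | h :: t => by
    rw [pvTally, pv_ofList_cons]
    have hcnt : ((h :: t).count h : Int)
        = (1 : Int) + (t.length : Int) - ((t.filter (fun x => x != h)).length : Int) := by
      have e1 : (t.filter (fun x => x != h)).length = t.countP (fun x => x != h) := by
        simp [List.countP_eq_length_filter]
      have e2 := List.length_eq_countP_add_countP (l := t) (p := fun x => x != h)
      have e3 : t.count h = t.countP (fun a => decide ¬((a != h) = true)) := by
        rw [List.count]
        apply List.countP_congr
        intro a _
        cases e : a == h <;> simp [bne, e]
      simp only [List.count_cons_self]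
      push_cast
      omega
    simp only [List.map_cons, hcnt]
    congr 1
    have hrec := pv_tally_eq (t.filter (fun x => x != h))
    rw [← hrec]
    apply List.map_congr_left
    intro k hk
    have hkf : k ∈ t.filter (fun x => x != h) := by
      simpa [PySem.Set.mem_ofList] using hk
    have hkh : k ≠ h := by
      have := (List.mem_filter.mp hkf).2; simpa using this
    have : (t.filter (fun x => x != h)).count k = t.count k := by
      rw [List.count_filter]
      simp [hkh]
    simp [this, Ne.symm hkh]
termination_by L => L.length
decreasing_by
  simp only [List.length_cons]
  exact Nat.lt_succ_of_le (List.length_filter_le _ _)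

-- ===== VERDICT =====
theorem count_grant_types_spec : Claim_equal_count_grant_types := by
  intro s _
  show count_grant_types s = count_grant_types_alt s
  unfold count_grant_types count_grant_types_alt
  dsimp only
  generalize (PySem.Str.split? s ", ").getD [] = L
  have h : L.foldl (fun d g =>
      if d.contains g then d.insert g (d.getD g 0 + 1) else d.insert g 1) PySem.Dict.empty
      = PySem.Dict.counter L := by
    rw [← PySem.Dict.foldl_insert_getD_add_one_eq_counter]
    apply PySem.List.foldl_congr_mem
    intro d g _
    by_cases hc : d.contains g
    · simp [hc]
    · simp [hc, PySem.Dict.getD_of_not_contains d 0 (by simpa using hc)]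
  rw [h, PySem.Dict.items_counter, pv_tally_eq]
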